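-- pv_equiv track=rewrite | github.com/pde-bakk/AdventOfCode | 2022/day25/day25.py | convert_from_snafu
-- ===== SOURCE A (Python) =====
-- def convert_from_snafu(s: str) -> int:
-- 	snafu_value = 0
-- 	for i, c in enumerate(s):
-- 		power = 5 ** (len(s) - i - 1)
-- 		if c.isdigit():
-- 			n = int(c)
-- 		else:
-- 			n = -1 if c == '-' else -2
-- 		snafu_value += n * power
-- 	return snafu_value
-- ===== SOURCE B (Python) =====
-- def convert_from_snafu(s: str) -> int:
--     value = 0
--     for c in s:
--         value = value * 5 + (int(c) if c.isdigit() else (-1 if c == '-' else -2))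
--     return value
-- ===== Notes on version B (the rewrite author's own statement) =====
-- stated objective: simpler
-- what changed: Replaces the per-character positional power 5**(len(s)-i-1) and sum of independent terms by Horner's method: a single accumulator value = value*5 + digit, no enumerate/len/exponentiation.
import Mathlib
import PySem

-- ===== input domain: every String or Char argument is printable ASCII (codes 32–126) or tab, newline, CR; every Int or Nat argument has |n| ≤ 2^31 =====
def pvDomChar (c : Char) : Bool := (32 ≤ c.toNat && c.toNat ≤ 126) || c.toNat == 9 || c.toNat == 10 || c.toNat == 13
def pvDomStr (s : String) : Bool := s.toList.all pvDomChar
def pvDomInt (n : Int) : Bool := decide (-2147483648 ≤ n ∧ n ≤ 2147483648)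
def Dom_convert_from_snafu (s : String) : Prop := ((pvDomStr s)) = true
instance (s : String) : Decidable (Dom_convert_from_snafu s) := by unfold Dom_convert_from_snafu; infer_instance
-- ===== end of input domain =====

-- B replaces the explicit positional power 5**(len(s)-i-1) with Horner's method (value = value*5 + digit); simpler single accumulator.

-- shared helper: the digit branch 'int(c) if c.isdigit() else (-1 if c == "-" else -2)', identical in both Pythons
-- (int(c) is exact via PySem.Int.ofChars?; in the digit branch it always parses, .getD 0 is never the default)
def snafuDigit (c : Char) : Int :=
  if PySem.Chars.isdigit c then (PySem.Int.ofChars? [c]).getD 0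
  else if c = '-' then -1 else -2

-- ===== PORT A =====
-- A: for i, c in enumerate(s): power = 5**(len(s)-i-1); snafu_value += n * power
-- (the enumerate index i is a nonnegative Int; .toNat is exact here since 0 ≤ i < len(s))
def convert_from_snafu (s : String) : Int :=
  (PySem.List.enumerate s.toList).foldl
    (fun acc p =>
      let power : Int := 5 ^ (s.toList.length - p.1.toNat - 1)
      acc + snafuDigit p.2 * power)
    0

-- ===== PORT B =====
-- B: value = 0; for c in s: value = value*5 + digit(c)
def convert_from_snafu_alt (s : String) : Int :=
  s.toList.foldl (fun v c => v * 5 + snafuDigit c) 0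

-- ===== PRECONDITION & SPEC =====
def Spec_convert_from_snafu (s : String) (out : Int) : Prop := out = convert_from_snafu_alt s
instance (s : String) (out : Int) : Decidable (Spec_convert_from_snafu s out) := by unfold Spec_convert_from_snafu; infer_instance

-- ===== CLAIM (what is proved, stated in full; the proofs are below) =====
def Claim_equal_convert_from_snafu : Prop := ∀ (s : String), Dom_convert_from_snafu s → Spec_convert_from_snafu s (convert_from_snafu s)

-- ===== LEMMAS AND PROOFS =====

-- Horner accumulator splits off: foldl from v = v * 5^len + foldl from 0
theorem horner_split (cs : List Char) (v : Int) :
    cs.foldl (fun v c => v * 5 + snafuDigit c) v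
      = v * 5 ^ cs.length + cs.foldl (fun v c => v * 5 + snafuDigit c) 0 := by
  induction cs generalizing v with
  | nil => simp
  | cons c cs ih =>
    simp only [List.foldl_cons, List.length_cons]
    rw [ih (v * 5 + snafuDigit c), ih (0 * 5 + snafuDigit c)]
    ring

-- A's enumerate/power fold equals Horner, for any start index k with k + cs.length = L
theorem powerfold_eq_horner (L : Nat) (cs : List Char) (k : Nat) (acc : Int)
    (h : k + cs.length = L) :
    (PySem.List.enumerate cs (k : Int)).foldl
        (fun acc p => acc + snafuDigit p.2 * (5 : Int) ^ (L - p.1.toNat - 1)) acc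
      = acc + cs.foldl (fun v c => v * 5 + snafuDigit c) 0 := by
  induction cs generalizing k acc with
  | nil => simp [PySem.List.enumerate_nil]
  | cons c cs ih =>
    rw [PySem.List.enumerate_cons]
    simp only [List.foldl_cons]
    have hk : ((k : Int) + 1) = ((k + 1 : Nat) : Int) := by push_cast; ring
    rw [hk, ih (k + 1) _ (by simp only [List.length_cons] at h; omega)]
    have he : L - ((k : Int)).toNat - 1 = cs.length := by
      simp only [List.length_cons] at h
      simp only [Int.toNat_natCast]; omega
    rw [he, horner_split cs (0 * 5 + snafuDigit c)]
    ring

-- ===== VERDICT (by name: the statement is the Claim_ definition above) =====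
theorem convert_from_snafu_spec : Claim_equal_convert_from_snafu := by
  intro s _
  show convert_from_snafu s = convert_from_snafu_alt s
  unfold convert_from_snafu convert_from_snafu_alt
  simpa using powerfold_eq_horner s.toList.length s.toList 0 0 (by simp)
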